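-- pv_equiv track=rewrite | github.com/hunterthesavage/job_application_agent | src/discover_job_urls.py | _canonical_country
-- ===== SOURCE A (Python) =====
-- COUNTRY_ALIASES = {
--     "us": "United States",
--     "u.s.": "United States",
--     "usa": "United States",
--     "united states of america": "United States",
--     "uk": "United Kingdom",
--     "u.k.": "United Kingdom",
--     "england": "United Kingdom",
-- }
--
-- def safe_text(value: object) -> str:
--     if value is None:
--         return ""
--     return str(value).strip()
--
-- def normalize_text(value: str) -> str:
--     return " ".join(safe_text(value).lower().replace("/", " ").replace("-", " ").split())
--
-- def _canonical_country(value: str) -> str: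
--     normalized = normalize_text(value)
--     if not normalized:
--         return ""
--     if normalized in COUNTRY_ALIASES:
--         return COUNTRY_ALIASES[normalized]
--     if normalized in {"united states", "united kingdom", "canada"}:
--         return " ".join(word.capitalize() for word in normalized.split())
--     return ""
-- ===== SOURCE B (Python) =====
-- COUNTRY_TABLE = {
--     "us": "United States",
--     "u.s.": "United States",
--     "usa": "United States",
--     "united states of america": "United States",
--     "uk": "United Kingdom",
--     "u.k.": "United Kingdom",
--     "england": "United Kingdom",
--     "united states": "United States",
--     "united kingdom": "United Kingdom",
--     "canada": "Canada",
-- }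
--
-- def _normalize(value: str) -> str:
--     return " ".join(str(value).strip().lower().replace("/", " ").replace("-", " ").split())
--
-- def _canonical_country(value: str) -> str:
--     normalized = _normalize(value)
--     if not normalized:
--         return ""
--     return COUNTRY_TABLE.get(normalized, "")
-- ===== Notes on version B (the rewrite author's own statement) =====
-- stated objective: simpler
-- what changed: Replaced A's two differently-shaped lookups (alias-dict branch plus set-membership branch with a per-word capitalize() recomputation) by one precomputed canonical-name table consulted with a single dict.get.
import Mathlib
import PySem

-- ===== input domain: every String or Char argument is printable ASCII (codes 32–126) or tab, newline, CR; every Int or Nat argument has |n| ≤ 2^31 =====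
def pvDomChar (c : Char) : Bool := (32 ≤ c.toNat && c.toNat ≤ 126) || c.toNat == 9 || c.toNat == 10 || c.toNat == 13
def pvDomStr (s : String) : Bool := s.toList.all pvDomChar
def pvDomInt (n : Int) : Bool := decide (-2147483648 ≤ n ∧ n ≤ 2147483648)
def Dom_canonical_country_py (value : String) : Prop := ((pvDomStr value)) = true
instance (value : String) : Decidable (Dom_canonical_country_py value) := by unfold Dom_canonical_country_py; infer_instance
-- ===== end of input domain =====

-- B folds A's two differently-shaped lookups (alias dict + set-membership-then-capitalize) into one
-- precomputed canonical table lookup; objective: simpler.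

-- ===== PORT A =====
def pvCountryAliases : PySem.Dict String String := PySem.Dict.mk
  [("us", "United States"), ("u.s.", "United States"), ("usa", "United States"),
   ("united states of america", "United States"),
   ("uk", "United Kingdom"), ("u.k.", "United Kingdom"), ("england", "United Kingdom")]

-- safe_text: for a str argument, str(value) is the identity, so this is .strip()
def pvSafeText (value : String) : String := PySem.Str.strip value

def pvNormalizeText (value : String) : String :=
  PySem.Str.join " " (PySem.Str.split₀
    (PySem.Str.replace (PySem.Str.replace (PySem.Str.lower (pvSafeText value)) "/" " ") "-" " "))

-- word.capitalize(): first char uppercased, rest lowered (exact on ASCII; ported by hand, no PySem primitive)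
def pvCapitalize (w : String) : String :=
  match w.toList with
  | [] => ""
  | c :: rest => String.ofList (PySem.Chars.upperChar c :: PySem.Chars.lower rest)

def canonical_country_py (value : String) : String :=
  let normalized := pvNormalizeText value
  if normalized = "" then ""
  else if pvCountryAliases.contains normalized then pvCountryAliases.getD normalized ""
  else if PySem.Set.contains (PySem.Set.ofList ["united states", "united kingdom", "canada"]) normalized then
    PySem.Str.join " " ((PySem.Str.split₀ normalized).map pvCapitalize)
  else ""

-- ===== PORT B =====
def pvCountryTable : PySem.Dict String String := PySem.Dict.mk
  [("us", "United States"), ("u.s.", "United States"), ("usa", "United States"),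
   ("united states of america", "United States"),
   ("uk", "United Kingdom"), ("u.k.", "United Kingdom"), ("england", "United Kingdom"),
   ("united states", "United States"), ("united kingdom", "United Kingdom"), ("canada", "Canada")]

def canonical_country_py_alt (value : String) : String :=
  let normalized := pvNormalizeText value
  if normalized = "" then "" else pvCountryTable.getD normalized ""

-- ===== PRECONDITION & SPEC =====
def Spec_canonical_country_py (value : String) (out : String) : Prop := out = canonical_country_py_alt value
instance (value : String) (out : String) : Decidable (Spec_canonical_country_py value out) := by unfold Spec_canonical_country_py; infer_instance

-- ===== CLAIM (what is proved, stated in full; the proofs are below) =====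
def Claim_equal_canonical_country_py : Prop := ∀ (value : String), Dom_canonical_country_py value → Spec_canonical_country_py value (canonical_country_py value)

-- ===== LEMMAS AND PROOFS =====

-- both results are the same function of the normalized string, whatever it is
theorem pv_core_eq (n : String) :
    (if n = "" then ""
     else if pvCountryAliases.contains n then pvCountryAliases.getD n ""
     else if PySem.Set.contains (PySem.Set.ofList ["united states", "united kingdom", "canada"]) n then
       PySem.Str.join " " ((PySem.Str.split₀ n).map pvCapitalize)
     else "") = (if n = "" then "" else pvCountryTable.getD n "") := by
  by_cases h0 : n = ""
  · simp [h0]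
  by_cases h1 : n = "us"; · subst h1; decide
  by_cases h2 : n = "u.s."; · subst h2; decide
  by_cases h3 : n = "usa"; · subst h3; decide
  by_cases h4 : n = "united states of america"; · subst h4; decide
  by_cases h5 : n = "uk"; · subst h5; decide
  by_cases h6 : n = "u.k."; · subst h6; decide
  by_cases h7 : n = "england"; · subst h7; decide
  by_cases h8 : n = "united states"; · subst h8; decide
  by_cases h9 : n = "united kingdom"; · subst h9; decide
  by_cases h10 : n = "canada"; · subst h10; decide
  simp [pvCountryAliases, pvCountryTable, PySem.Dict.contains, PySem.Dict.getD, PySem.Dict.get?,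
    PySem.Set.contains, PySem.Set.ofList, h0, Ne.symm h1, Ne.symm h2, Ne.symm h3, Ne.symm h4,
    Ne.symm h5, Ne.symm h6, Ne.symm h7, Ne.symm h8, Ne.symm h9, Ne.symm h10,
    h8, h9, h10]

-- ===== VERDICT (by name: the statement is the Claim_ definition above) =====
theorem canonical_country_py_spec : Claim_equal_canonical_country_py := by
  intro value _
  unfold Spec_canonical_country_py canonical_country_py canonical_country_py_alt
  exact pv_core_eq (pvNormalizeText value)
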